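-- pv_equiv track=rewrite | github.com/fraim-dev/fraim | fraim/workflows/infrastructure_discovery/consolidation.py | _normalize_environment_name
-- ===== SOURCE A (Python) =====
-- def _normalize_environment_name(env_name: str) -> str:
--     """Normalize environment names for consistent grouping."""
--     name_lower = env_name.lower().strip()
--
--     # Common environment name mappings
--     ENV_MAPPINGS = {
--         "development": ["dev", "develop", "development"],
--         "staging": ["stage", "staging", "stg", "test", "testing"],
--         "production": ["prod", "production", "live"],
--         "preview": ["preview", "pre", "demo"],
--         "qa": ["qa", "quality", "qassurance"],
--     }
--
--     for normalized, variants in ENV_MAPPINGS.items():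
--         if name_lower in variants:
--             return normalized
--
--     # Return original if no mapping found
--     return name_lower
-- ===== SOURCE B (Python) =====
-- def _normalize_environment_name(env_name: str) -> str:
--     """Normalize environment names for consistent grouping."""
--     name_lower = env_name.lower().strip()
--     # Decision tree: dispatch on the first character, then a couple of
--     # literal comparisons per branch; no mapping table is traversed.
--     first = name_lower[:1]
--     if first == "d":
--         if name_lower == "demo":
--             return "preview"
--         if name_lower in ("dev", "develop", "development"):
--             return "development"
--     elif first == "s":
--         if name_lower in ("stage", "staging", "stg"):
--             return "staging"
--     elif first == "t":
--         if name_lower in ("test", "testing"):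
--             return "staging"
--     elif first == "p":
--         if name_lower in ("pre", "preview"):
--             return "preview"
--         if name_lower in ("prod", "production"):
--             return "production"
--     elif first == "l":
--         if name_lower == "live":
--             return "production"
--     elif first == "q":
--         if name_lower in ("qa", "quality", "qassurance"):
--             return "qa"
--     return name_lower
-- ===== Notes on version B (the rewrite author's own statement) =====
-- stated objective: alternative
-- what changed: B replaces A's loop over the ENV_MAPPINGS dict with list-membership scans by a decision tree that dispatches on the first character of the lowered/stripped name and then does at most a few literal comparisons per branch, with no mapping table at all.
import Mathlib
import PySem

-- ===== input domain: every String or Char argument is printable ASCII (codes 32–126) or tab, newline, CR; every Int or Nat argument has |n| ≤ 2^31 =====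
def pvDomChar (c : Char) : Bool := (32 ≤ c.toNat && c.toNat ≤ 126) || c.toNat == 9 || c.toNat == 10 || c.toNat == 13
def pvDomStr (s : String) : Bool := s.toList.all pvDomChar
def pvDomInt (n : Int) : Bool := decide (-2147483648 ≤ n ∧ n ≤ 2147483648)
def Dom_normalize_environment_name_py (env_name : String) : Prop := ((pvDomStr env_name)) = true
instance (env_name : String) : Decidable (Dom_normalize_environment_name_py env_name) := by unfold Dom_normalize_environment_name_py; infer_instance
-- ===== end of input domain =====

-- B replaces A's scan over the ENV_MAPPINGS table by a decision tree dispatching on the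
-- first character of the lowered/stripped name (alternative structure, no mapping table).


-- ===== PORT A =====
-- ENV_MAPPINGS as an insertion-ordered association list (dict of A)
def pvEnvMappings : List (String × List String) :=
  [("development", ["dev", "develop", "development"]),
   ("staging", ["stage", "staging", "stg", "test", "testing"]),
   ("production", ["prod", "production", "live"]),
   ("preview", ["preview", "pre", "demo"]),
   ("qa", ["qa", "quality", "qassurance"])]

-- the 'for normalized, variants in ENV_MAPPINGS.items(): if name_lower in variants: return normalized' loop
def pvMapLoop : List (String × List String) → String → String
  | [], name_lower => name_lower
  | (normalized, variants) :: rest, name_lower =>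
      if variants.contains name_lower then normalized else pvMapLoop rest name_lower

def normalize_environment_name_py (env_name : String) : String :=
  pvMapLoop pvEnvMappings (PySem.Str.strip (PySem.Str.lower env_name))

-- ===== PORT B =====
-- Source B's decision tree on name_lower: branch on name_lower[:1], then literal comparisons.
def pvTree (name_lower : String) : String :=
  -- first = name_lower[:1]  (slice, safe on the empty string)
  let first := String.ofList (PySem.List.slice name_lower.toList none (some 1))
  if first = "d" then
    if name_lower = "demo" then "preview"
    else if ["dev", "develop", "development"].contains name_lower then "development"
    else name_lower
  else if first = "s" then
    if ["stage", "staging", "stg"].contains name_lower then "staging" else name_lower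
  else if first = "t" then
    if ["test", "testing"].contains name_lower then "staging" else name_lower
  else if first = "p" then
    if ["pre", "preview"].contains name_lower then "preview"
    else if ["prod", "production"].contains name_lower then "production"
    else name_lower
  else if first = "l" then
    if name_lower = "live" then "production" else name_lower
  else if first = "q" then
    if ["qa", "quality", "qassurance"].contains name_lower then "qa" else name_lower
  else name_lower

def normalize_environment_name_py_alt (env_name : String) : String :=
  pvTree (PySem.Str.strip (PySem.Str.lower env_name))

-- ===== PRECONDITION & SPEC =====
def Spec_normalize_environment_name_py (env_name : String) (out : String) : Prop := out = normalize_environment_name_py_alt env_name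
instance (env_name : String) (out : String) : Decidable (Spec_normalize_environment_name_py env_name out) := by unfold Spec_normalize_environment_name_py; infer_instance

-- ===== CLAIM (what is proved, stated in full; the proofs are below) =====
def Claim_equal_normalize_environment_name_py : Prop := ∀ (env_name : String), Dom_normalize_environment_name_py env_name → Spec_normalize_environment_name_py env_name (normalize_environment_name_py env_name)

-- ===== LEMMAS AND PROOFS =====

-- Core fact: on ANY string, A's scan over the mapping equals B's decision tree.
theorem pvMapLoop_eq_tree (nl : String) :
    pvMapLoop pvEnvMappings nl = pvTree nl := by
  by_cases h1 : "dev" = nl; · subst h1; decide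
  by_cases h2 : "develop" = nl; · subst h2; decide
  by_cases h3 : "development" = nl; · subst h3; decide
  by_cases h4 : "stage" = nl; · subst h4; decide
  by_cases h5 : "staging" = nl; · subst h5; decide
  by_cases h6 : "stg" = nl; · subst h6; decide
  by_cases h7 : "test" = nl; · subst h7; decide
  by_cases h8 : "testing" = nl; · subst h8; decide
  by_cases h9 : "prod" = nl; · subst h9; decide
  by_cases h10 : "production" = nl; · subst h10; decide
  by_cases h11 : "live" = nl; · subst h11; decide
  by_cases h12 : "preview" = nl; · subst h12; decide
  by_cases h13 : "pre" = nl; · subst h13; decide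
  by_cases h14 : "demo" = nl; · subst h14; decide
  by_cases h15 : "qa" = nl; · subst h15; decide
  by_cases h16 : "quality" = nl; · subst h16; decide
  by_cases h17 : "qassurance" = nl; · subst h17; decide
  -- nl is none of the 17 variants: both sides return nl regardless of nl's first char
  simp only [pvMapLoop, pvEnvMappings, pvTree, List.contains_eq_mem, List.mem_cons,
    List.not_mem_nil, decide_eq_true_eq,
    Ne.symm h1, Ne.symm h2, Ne.symm h3, Ne.symm h4, Ne.symm h5, Ne.symm h6, Ne.symm h7,
    Ne.symm h8, Ne.symm h9, Ne.symm h10, Ne.symm h11, Ne.symm h12, Ne.symm h13, Ne.symm h14,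
    Ne.symm h15, Ne.symm h16, Ne.symm h17, or_self, if_false]
  split_ifs <;> rfl

-- ===== VERDICT (by name: the statement is the Claim_ definition above) =====
theorem normalize_environment_name_py_spec : Claim_equal_normalize_environment_name_py := by
  intro env_name _
  unfold Spec_normalize_environment_name_py normalize_environment_name_py normalize_environment_name_py_alt
  exact pvMapLoop_eq_tree _
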